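/- GENERATED by mk_final_copies.py from the proof of the farm's unit `start_decoder.R2` (farm:start_decoder.R2.2: Proof.lean) as the
   re-elaboration sweep compiled it — do not edit. -/
import Asan.CheckWalk
import Vorbis.Spec.StartDecoderBTest
import Vorbis.Spec.Units.start_decoder_R2
import Vorbis.Spec.Worked.start_decoder_R2_Lemmas

open X86 X86.User Asan Vorbis Vorbis.Spec Vorbis.Spec.StartDecoder

set_option maxRecDepth 4000
set_option maxHeartbeats 4000000

namespace Vorbis.Spec.start_decoder_R2

/-- **0x115982 … 0x1159a4 / 0x1159f8** (stb_vorbis_fixed.c:4043, 4091): the check and the signed test `i < f->residue_count` of loop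
4043. Taken: the exit to R3 (`r3_exit`: only the check's return address was pushed). Not taken (`i = residue_count`, SD.7):
`get_bits(f, 6)`; the walk stops after its return (cut236) with the point `Pt` (SD.7 over the snapshot `A.1`) and `rax < 64`. -/
theorem r2_head (Lay : Layout) (hLay : Lay.hi = 0x1000000) (μ : Microarch) (hμ : UserX.MicroOK μ) (u₀ : State)
    (hcode : HasCodeNat Lay u₀ Vorbis.L.start_decoder.entry Vorbis.Code.code_start_decoder.nat Vorbis.L.start_decoder.size)
    (hload4 : Asan.SmallCheck Lay μ Vorbis.WayInv (Vorbis.CodeOK u₀) [.rax, .rcx, .rdx] 4 Vorbis.L.__asan_load4_noabort.entry)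
    (h_get_bits : ∀ (others : List Obj) (frames : List (Nat × FrameLayout)) (Blk : Block → Prop) (len : Nat), Calls Lay μ Vorbis.WayInv (Vorbis.conv u₀) Vorbis.L.get_bits.entry (Vorbis.Spec.get_bits.spec others frames Blk len))
    (g : Ghost) (i : Nat) (A6 A6c : Arena) (A : Arena × List Obj) (v : State) (hat : BodyR2 u₀ g i A6 A6c A v) :
    ReachVia Lay μ WayInv v (fun w => AtR3 u₀ g i w ∨
      (Pt u₀ g Vorbis.L.start_decoder.cut236 A.1 A w ∧ (w.reg .rax).toNat < 64)) := by
  have hfr := hat.loop.frame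
  have hmid := hat.loop.mid
  have he := hfr.entry
  v_entry he
  simp only [depth] at he_room he_stack
  have hR := hfr.r_eq
  simp only [steady] at hR
  have eRA : g.RA = (g.e.reg .rsp).toNat := rfl
  have hwh := obj_where hfr hat.loop.hand
  have w_rip := hfr.rip
  have c_rsp : v.reg .rsp = g.e.reg .rsp - 1480 := by
    rw [hfr.rsp]
    exact rsp_eq _ (by omega)
  have c_rbp := hat.rbp
  have c_r14 := hat.r14
  have w_eq : Mem.EqOn Vorbis.L.textLo Vorbis.L.textHi u₀.mem v.mem := hfr.code
  have hdf : v.flags .df = false := (show abiInv _ from hfr.inv).1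
  have hmx : v.mxcsr &&& 0x1F80 = 0x1F80 := (show abiInv _ from hfr.inv).2
  have hsse := Vorbis.sseOK_of_abiInv hfr.inv
  have hgb := h_get_bits A.2 g.frames' (g.Blk A) g.len
  have hfa : (addr g.f).toNat = g.f := toNat_addr _ (by omega)
  have r320 : v.mem.readLE (addr g.f + 320) 4 = v.mem.u32 (g.f + 320) := by
    rw [r2_fld]
    rfl
  have hi64 : i ≤ 64 := by
    have h1 := hat.loop.res.R1
    have h2 := hat.loop.i_le
    omega
  u_walk hcode [hμ.vendor] until [Vorbis.L.start_decoder.cut236, Vorbis.L.start_decoder.cut239] span [Vorbis.L.textLo, Vorbis.L.textHi] side (v_side)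
  case check_115989 =>
    -- 0x115989: the check of `f->residue_count` (stb_vorbis_fixed.c:4043)
    have hun : ShadowUntouched v.mem s_115989.mem := by v_untouched
    exact check_field hfr hmid hun 320 4 (by omega) (by omega) (r2_fld g.f 320)
  case call_inv =>
    v_inv
  case pre_11599f =>
    -- the precondition of `get_bits(f, 6)`: the shadow layer below the pushed return address, the reader's environment, `Bits f`
    have hun : ShadowUntouched v.mem s_11599f.mem := by v_untouched
    have hsame : Mem.SameExcept [⟨g.RA - 1888, g.R⟩] v.mem s_11599f.mem := by
      rw [w_mem]
      apply Mem.SameExcept.writeLE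
      · u_omega
      · refine ⟨_, List.mem_cons_self, ?_, ?_⟩
        · simp only []
          u_omega
        · simp only []
          u_omega
    refine ⟨⟨shadowPre_call hfr (by rw [w_rsp]; u_omega) hun, ?_, ?_⟩, ?_⟩
    · rw [w_rdi, hfa]
      exact readerEnv_mid hat.loop.hand hmid
    · rw [w_rdi, hfa]
      exact (Vorbis.Spec.Reader.reader_of_window hmid.bits hsame (by omega)).1
    · rw [bitsArg_def, w_rsi]
      decide
  · -- 0x1159f8: the exit to R3 (`i < residue_count`)
    refine ReachVia.done (Or.inl ?_)
    rw [br_lt _ _ _ hi64] at hbr_115995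
    have hsame : Mem.SameExcept [⟨g.RA - 1888, g.R⟩] v.mem s_115995.mem := by
      rw [w_mem]
      apply Mem.SameExcept.writeLE
      · u_omega
      · refine ⟨_, List.mem_cons_self, ?_, ?_⟩
        · simp only []
          u_omega
        · simp only []
          u_omega
    refine r3_exit hat hsame w_rip ?_ ?_ ?_ w_eq ?_ hbr_115995
    · rw [w_rsp, ← c_rsp]
      exact hfr.rsp
    · rw [w_kept.get .rbp rfl]
      exact c_rbp
    · rw [w_kept.get .r14 rfl]
      exact c_r14
    · v_inv
  · -- 0x1159a4: `get_bits` has returned (`i = residue_count`: SD.7)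
    refine ReachVia.done (Or.inr ?_)
    v_after_call w_rsp_11599f w_mem_11599f
    simp only [w_rdi_11599f, hfa] at w_same
    have eb : bitsArg s_11599f = 6 := by
      rw [bitsArg_def, w_rsi_11599f]
      decide
    have hpost : GetBitsSpecPost (g.Blk A) g.len (s_11599f.reg .rdi).toNat (bitsArg s_11599f) s_11599f s_11599fr := w_post
    rw [w_rdi_11599f, hfa, eb] at hpost
    have hieq : (i : Int) = stb_vorbis.residue_count v.mem g.f := by
      have hle := hat.loop.i_le
      rw [br_lt _ _ _ hi64] at hbr_115995
      omega
    have hpt := pt_start hat hieq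
    have hs : Mem.SameExcept [⟨g.RA - 1888, g.R⟩, ⟨g.f + 48, g.f + 56⟩, ⟨g.f + 84, g.f + 96⟩, ⟨g.f + 136, g.f + 144⟩,
        ⟨g.f + 1484, g.f + 1749⟩, ⟨g.f + 1752, g.f + 1784⟩] v.mem s_11599fr.mem := by
      u_same
    have hcl : ∀ w, w ∈ [(⟨g.RA - 1888, g.R⟩ : Span), ⟨g.f + 48, g.f + 56⟩, ⟨g.f + 84, g.f + 96⟩, ⟨g.f + 136, g.f + 144⟩,
        ⟨g.f + 1484, g.f + 1749⟩, ⟨g.f + 1752, g.f + 1784⟩] → SpanLow g w := by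
      intro w hw
      simp only [List.mem_cons, List.mem_nil_iff, or_false] at hw
      unfold SpanLow
      rcases hw with rfl | rfl | rfl | rfl | rfl | rfl <;> simp only [] <;> omega
    obtain ⟨harena', hun⟩ := hpt.low_keep hs hcl
    refine ⟨?_, ?_⟩
    · refine hpt.move hs (fun w hw => (hcl w hw).ok _ _) w_rip ?_ ?_ w_eq w_inv (hfr.shadow.untouched hun) hfr.offText
        (Arena.Extends.refl _) (fun o ho => ho) harena' hmid.noTemps hpost.bits.bits
      · rw [w_rsp, ← c_rsp]
        exact hfr.rsp
      · rw [w_kept.get .rbp rfl]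
        exact c_rbp
    · exact hpost.bits.result.2 (by omega)

/-- **0x1159a4 … 0x1159c7** (stb_vorbis_fixed.c:4091 – 4092): `f->mapping_count = rax + 1` (check store4 `f + 0x1d0`),
`setup_malloc(f, 56·mapping_count)`; the walk stops after its return (cut237) with `AfterAlloc`: the point for the ghost arena after
the call, MP1's field clause, and the result — NULL, or the block allocated since the snapshot. -/
theorem r2_alloc (Lay : Layout) (hLay : Lay.hi = 0x1000000) (μ : Microarch) (hμ : UserX.MicroOK μ) (u₀ : State)
    (hcode : HasCodeNat Lay u₀ Vorbis.L.start_decoder.entry Vorbis.Code.code_start_decoder.nat Vorbis.L.start_decoder.size)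
    (hstore4 : Asan.SmallCheck Lay μ Vorbis.WayInv (Vorbis.CodeOK u₀) [.rax, .rcx, .rdx] 4 Vorbis.L.__asan_store4_noabort.entry)
    (h_setup_malloc : ∀ (others : List Obj) (frames : List (Nat × FrameLayout)) (A : Arena), Calls Lay μ Vorbis.WayInv (Vorbis.conv u₀) Vorbis.L.setup_malloc.entry (Vorbis.Spec.setup_malloc.spec others frames A))
    (g : Ghost) (A7 : Arena) (A : Arena × List Obj) (v : State) (hpt : Pt u₀ g Vorbis.L.start_decoder.cut236 A7 A v)
    (hrax : (v.reg .rax).toNat < 64) :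
    ReachVia Lay μ WayInv v (fun w => AfterAlloc u₀ g A7 w) := by
  have hfr := hpt.frame
  have hmid := hpt.mid
  have he := hfr.entry
  v_entry he
  simp only [depth] at he_room he_stack
  have hR := hfr.r_eq
  simp only [steady] at hR
  have eRA : g.RA = (g.e.reg .rsp).toNat := rfl
  have hwh := obj_where hfr hpt.hand
  have w_rip := hfr.rip
  have c_rsp : v.reg .rsp = g.e.reg .rsp - 1480 := by
    rw [hfr.rsp]
    exact rsp_eq _ (by omega)
  have c_rbp := hpt.rbp
  obtain ⟨z, hz⟩ : ∃ z : Nat, (v.reg .rax).toNat = z := ⟨_, rfl⟩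
  have hz64 : z < 64 := by omega
  have c_rax : v.reg .rax = addr z := eq_addr _ _ hz
  have w_eq : Mem.EqOn Vorbis.L.textLo Vorbis.L.textHi u₀.mem v.mem := hfr.code
  have hdf : v.flags .df = false := (show abiInv _ from hfr.inv).1
  have hmx : v.mxcsr &&& 0x1F80 = 0x1F80 := (show abiInv _ from hfr.inv).2
  have hsse := Vorbis.sseOK_of_abiInv hfr.inv
  have hsm := h_setup_malloc A.2 g.frames' A.1
  have hfa : (addr g.f).toNat = g.f := toNat_addr _ (by omega)
  u_walk hcode [hμ.vendor] until [Vorbis.L.start_decoder.cut237] span [Vorbis.L.textLo, Vorbis.L.textHi] side (v_side)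
  case check_1159af =>
    -- 0x1159af: the check of the store `f->mapping_count = …` (stb_vorbis_fixed.c:4091)
    have hun : ShadowUntouched v.mem s_1159af.mem := by v_untouched
    exact check_field hfr hmid hun 464 4 (by omega) (by omega) (r2_fld g.f 464)
  case call_inv =>
    v_inv
  case pre_1159c2 =>
    -- the precondition of `setup_malloc(f, 56·mapping_count)`: the shadow layer, OB1, the arena layer
    have hs : Mem.SameExcept [⟨g.RA - 1888, g.R⟩, ⟨g.f + 464, g.f + 468⟩] v.mem s_1159c2.mem := by
      u_same
    have hcl : ∀ w, w ∈ [(⟨g.RA - 1888, g.R⟩ : Span), ⟨g.f + 464, g.f + 468⟩] → SpanLow g w := by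
      intro w hw
      simp only [List.mem_cons, List.mem_nil_iff, or_false] at hw
      unfold SpanLow
      rcases hw with rfl | rfl <;> simp only [] <;> omega
    obtain ⟨ha, hun⟩ := hpt.low_keep hs hcl
    refine ⟨shadowPre_call hfr (by rw [w_rsp]; u_omega) hun, ?_, ?_, hpt.hand.arenaText⟩
    · rw [w_rdi, hfa]
      exact (hpt.hand.obj.mono (frames'_sub g A.2)).blockLive
    · rw [w_rdi, hfa]
      exact ha
  -- 0x1159c7: `setup_malloc` has returned
  refine ReachVia.done ?_
  have w_eq := Vorbis.conv_code_eqOn w_code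
  have esz := sz_val z hz64
  simp only [X86.User.Spec.footprint, vspec, w_rsp_1159c2, w_rdi_1159c2, hfa, w_rsi_1159c2, esz, shadowSpan] at w_same
  have hpost := w_post
  simp only [setup_malloc.spec, w_rdi_1159c2, hfa, w_rsi_1159c2, esz] at hpost
  -- the field `mapping_count`, stored before the call, read back after it
  have hmc0 : s_1159c2.mem.readLE (addr g.f + 464) 4 = z + 1 := by
    rw [w_mem_1159c2, ← mc_val z hz64]
    u_read
  have hmc1 : s_1159c2r.mem.readLE (addr g.f + 464) 4 = z + 1 := by
    u_frame hmc0
  rw [w_mem_1159c2] at w_same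
  have hmc : stb_vorbis.mapping_count s_1159c2r.mem g.f = ((z + 1 : Nat) : Int) := by
    simp only [vacc, voff]
    rw [Mem.i32_def]
    have e : s_1159c2r.mem.u32 (g.f + 464) = z + 1 := by
      rw [← hmc1, r2_fld]
      rfl
    rw [e]
    have hc := sint32_cases (z + 1)
    omega
  -- the whole footprint since the cut point
  have hall : Mem.SameExcept [⟨g.RA - 1888, g.R⟩, ⟨g.f + 464, g.f + 468⟩, ⟨g.f + 8, g.f + 12⟩, ⟨g.f + 128, g.f + 132⟩,
      ⟨0xC00000 + (A.1.B + A.1.S + 32) / 8, 0xC00000 + (A.1.B + A.1.S + 32 + 56 * (z + 1) + 7) / 8⟩] v.mem s_1159c2r.mem := by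
    u_same
  have hun0 : ShadowUntouched v.mem s_1159c2.mem := by
    rw [w_mem_1159c2]
    v_untouched
  have hrsp : s_1159c2r.reg .rsp = addr g.R := by
    rw [w_rsp, ← c_rsp]
    exact hfr.rsp
  have hrbp : s_1159c2r.reg .rbp = addr g.f := by
    rw [w_kept.get .rbp rfl]
    exact c_rbp
  have hcfg : ∀ w, w ∈ [(⟨g.RA - 1888, g.R⟩ : Span), ⟨g.f + 464, g.f + 468⟩, ⟨g.f + 8, g.f + 12⟩, ⟨g.f + 128, g.f + 132⟩,
      ⟨0xC00000 + (A.1.B + A.1.S + 32) / 8, 0xC00000 + (A.1.B + A.1.S + 32 + 56 * (z + 1) + 7) / 8⟩] → SpanCfg g.f w := by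
    intro w hw
    simp only [List.mem_cons, List.mem_nil_iff, or_false] at hw
    unfold SpanCfg
    rcases hw with rfl | rfl | rfl | rfl | rfl <;> simp only [] <;> omega
  have hbits : Bits (g.Blk A) g.len s_1159c2r.mem g.f := bits_keep hmid.bits hall hcfg
  have harena := hmid.arena
  have hab := harena.bounds
  have hmp1 : 1 ≤ stb_vorbis.mapping_count s_1159c2r.mem g.f ∧ stb_vorbis.mapping_count s_1159c2r.mem g.f ≤ 64 := by
    rw [hmc]
    omega
  by_cases hfit : A.1.Fits (56 * (z + 1))
  · -- success: one block more
    obtain ⟨hrax', harena', hshadow'⟩ := hpost.1 hfit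
    have hsince : Since A.1 (A.1.pushSetup (56 * (z + 1))) ⟨A.1.B + (A.1.S + 32), 56 * (z + 1)⟩ :=
      harena.since_pushSetup (56 * (z + 1))
    have hfit' : A.1.S + 32 + r8 (56 * (z + 1)) ≤ A.1.T := hfit
    have hl8 := le_r8 (56 * (z + 1))
    refine ⟨(A.1.pushSetup (56 * (z + 1)), A.1.newSetupObj (56 * (z + 1)) :: A.2), ?_, hmp1, Or.inr ⟨?_, ?_⟩⟩
    · refine hpt.move hall ?_ w_rip hrsp hrbp w_eq w_inv ?_ ?_ (A.1.extends_pushSetup _) (fun o ho => List.mem_cons_of_mem _ ho)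
        harena' hmid.noTemps hbits
      · intro w hw
        simp only [List.mem_cons, List.mem_nil_iff, or_false] at hw
        have eB : (A.1.pushSetup (56 * (z + 1))).B = A.1.B := rfl
        have eL : (A.1.pushSetup (56 * (z + 1))).L = A.1.L := rfl
        unfold SpanOK
        rw [eB, eL]
        rcases hw with rfl | rfl | rfl | rfl | rfl
        · left
          simp only []
          omega
        · right; right; right; left
          simp only []
          omega
        · right; left
          simp only []
          omega
        · right; right; left
          simp only []
          omega
        · right; right; right; right; right; right; left
          simp only []
          omega
      · have e : (s_1159c2.reg .rsp).toNat + 8 = g.R := by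
          rw [w_rsp_1159c2]
          u_omega
        rw [e] at hshadow'
        exact hshadow'
      · intro o ho
        rcases List.mem_cons.mp ho with rfl | h2
        · have hat := hpt.hand.arenaText
          show L.textHi ≤ A.1.B + (A.1.S + 32)
          omega
        · exact hfr.offText o h2
    · rw [hrax']
      have := harena.AR1
      omega
    · rw [hrax', hmc]
      simp only [voff]
      have e : A.1.B + A.1.S + 32 = A.1.B + (A.1.S + 32) := by omega
      rw [e]
      exact hsince.older hmid.extc
  · -- failure: NULL, the arena and the shadow as they were
    obtain ⟨hrax', harena', hun1, _hsame1⟩ := hpost.2 hfit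
    have hun : ShadowUntouched v.mem s_1159c2r.mem := Mem.EqOn.trans hun0 hun1
    have hs : Mem.SameExcept [⟨g.RA - 1888, g.R⟩, ⟨g.f + 464, g.f + 468⟩, ⟨g.f + 8, g.f + 12⟩, ⟨g.f + 128, g.f + 132⟩]
        v.mem s_1159c2r.mem := by
      apply drop_shadow hall hun
      intro w hw
      simp only [List.mem_cons, List.mem_nil_iff, or_false] at hw ⊢
      rcases hw with rfl | rfl | rfl | rfl | rfl
      · exact Or.inl (Or.inl rfl)
      · exact Or.inl (Or.inr (Or.inl rfl))
      · exact Or.inl (Or.inr (Or.inr (Or.inl rfl)))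
      · exact Or.inl (Or.inr (Or.inr (Or.inr rfl)))
      · right
        simp only []
        omega
    refine ⟨A, ?_, hmp1, Or.inl hrax'⟩
    refine hpt.move hs ?_ w_rip hrsp hrbp w_eq w_inv (hfr.shadow.untouched hun) hfr.offText (Arena.Extends.refl _)
      (fun o ho => ho) harena' hmid.noTemps hbits
    intro w hw
    simp only [List.mem_cons, List.mem_nil_iff, or_false] at hw
    unfold SpanOK
    rcases hw with rfl | rfl | rfl | rfl
    · left
      simp only []
      omega
    · right; right; right; left
      simp only []
      omega
    · right; left
      simp only []
      omega
    · right; right; left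
      simp only []
      omega

/-- **0x1159c7 … 0x113b22, `mapping = NULL`** (stb_vorbis_fixed.c:4092 – 4093): the store of `f->mapping` (check store8
`f + 0x1d8`), `error(f, VORBIS_outofmem)`, `jmp` to the epilogue: `AtERR` with eax = 0 and SD.ERR (H2, H3 from the finished residue
group, H5 from `mapping = NULL`). -/
theorem r2_fail (Lay : Layout) (hLay : Lay.hi = 0x1000000) (μ : Microarch) (hμ : UserX.MicroOK μ) (u₀ : State)
    (hcode : HasCodeNat Lay u₀ Vorbis.L.start_decoder.entry Vorbis.Code.code_start_decoder.nat Vorbis.L.start_decoder.size)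
    (hstore8 : Asan.SmallCheck Lay μ Vorbis.WayInv (Vorbis.CodeOK u₀) [.rax, .rcx, .rdx] 8 Vorbis.L.__asan_store8_noabort.entry)
    (h_error : ∀ (others : List Obj) (frames : List (Nat × FrameLayout)), Calls Lay μ Vorbis.WayInv (Vorbis.conv u₀) Vorbis.L.error.entry (Vorbis.Spec.error.spec others frames))
    (g : Ghost) (A7 : Arena) (A : Arena × List Obj) (v : State) (hpt : Pt u₀ g Vorbis.L.start_decoder.cut237 A7 A v)
    (c_rax : v.reg .rax = 0) :
    ReachVia Lay μ WayInv v (fun w => AtERR u₀ g w) := by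
  have hfr := hpt.frame
  have hmid := hpt.mid
  have he := hfr.entry
  v_entry he
  simp only [depth] at he_room he_stack
  have hR := hfr.r_eq
  simp only [steady] at hR
  have eRA : g.RA = (g.e.reg .rsp).toNat := rfl
  have hwh := obj_where hfr hpt.hand
  have w_rip := hfr.rip
  have c_rsp : v.reg .rsp = g.e.reg .rsp - 1480 := by
    rw [hfr.rsp]
    exact rsp_eq _ (by omega)
  have c_rbp := hpt.rbp
  have w_eq : Mem.EqOn Vorbis.L.textLo Vorbis.L.textHi u₀.mem v.mem := hfr.code
  have hdf : v.flags .df = false := (show abiInv _ from hfr.inv).1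
  have hmx : v.mxcsr &&& 0x1F80 = 0x1F80 := (show abiInv _ from hfr.inv).2
  have hsse := Vorbis.sseOK_of_abiInv hfr.inv
  have herr := h_error A.2 g.frames'
  have hfa : (addr g.f).toNat = g.f := toNat_addr _ (by omega)
  u_walk hcode [hμ.vendor] until [Vorbis.L.start_decoder.cut238, Vorbis.L.start_decoder.cut4] span [Vorbis.L.textLo, Vorbis.L.textHi] side (v_side)
  case check_1159d1 =>
    -- 0x1159d1: the check of the store `f->mapping = …` (stb_vorbis_fixed.c:4092)
    have hun : ShadowUntouched v.mem s_1159d1.mem := by v_untouched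
    exact check_field hfr hmid hun 472 8 (by omega) (by omega) (r2_fld g.f 472)
  case call_inv =>
    v_inv
  case pre_1159ee =>
    -- the precondition of `error(f, VORBIS_outofmem)`: the shadow layer, OB1
    have hs : Mem.SameExcept [⟨g.RA - 1888, g.R⟩, ⟨g.f + 472, g.f + 480⟩] v.mem s_1159ee.mem := by
      u_same
    have hcl : ∀ w, w ∈ [(⟨g.RA - 1888, g.R⟩ : Span), ⟨g.f + 472, g.f + 480⟩] → SpanLow g w := by
      intro w hw
      simp only [List.mem_cons, List.mem_nil_iff, or_false] at hw
      unfold SpanLow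
      rcases hw with rfl | rfl <;> simp only [] <;> omega
    obtain ⟨_, hun⟩ := hpt.low_keep hs hcl
    refine ⟨shadowPre_call hfr (by rw [w_rsp]; u_omega) hun, ?_⟩
    rw [w_rdi, hfa]
    exact hpt.hand.obj.mono (frames'_sub g A.2)
  -- 0x1159f3: `error` has returned
  have w_eq := Vorbis.conv_code_eqOn w_code
  have w_df := (show X86.User.abiInv _ from w_inv).1
  have w_mx := (show X86.User.abiInv _ from w_inv).2
  have w_sse := Vorbis.sseOK_of_abiInv w_inv
  simp only [X86.User.Spec.footprint, vspec, w_rsp_1159ee, w_rdi_1159ee, hfa] at w_same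
  -- the field `mapping` (NULL), stored before the call, read back after it
  have hm0 : s_1159ee.mem.readLE (addr g.f + 472) 8 = 0 := by
    rw [w_mem_1159ee]
    u_read
  have hm1 : s_1159eer.mem.readLE (addr g.f + 472) 8 = 0 := by
    u_frame hm0
  rw [w_mem_1159ee] at w_same
  have hall : Mem.SameExcept [⟨g.RA - 1888, g.R⟩, ⟨g.f + 472, g.f + 480⟩, ⟨g.f + 140, g.f + 144⟩] v.mem s_1159eer.mem := by
    u_same
  have hrax : s_1159eer.reg .rax = 0 := w_post.1
  u_walk hcode [hμ.vendor] until [Vorbis.L.start_decoder.cut4] span [Vorbis.L.textLo, Vorbis.L.textHi] side (v_side)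
  -- 0x113b22: the epilogue, with eax = 0 and SD.ERR
  refine ReachVia.done ?_
  rw [← w_mem] at hall hm1
  have hcl : ∀ w, w ∈ [(⟨g.RA - 1888, g.R⟩ : Span), ⟨g.f + 472, g.f + 480⟩, ⟨g.f + 140, g.f + 144⟩] → SpanLow g w := by
    intro w hw
    simp only [List.mem_cons, List.mem_nil_iff, or_false] at hw
    unfold SpanLow
    rcases hw with rfl | rfl | rfl <;> simp only [] <;> omega
  have hcfg : ∀ w, w ∈ [(⟨g.RA - 1888, g.R⟩ : Span), ⟨g.f + 472, g.f + 480⟩, ⟨g.f + 140, g.f + 144⟩] → SpanCfg g.f w := by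
    intro w hw
    simp only [List.mem_cons, List.mem_nil_iff, or_false] at hw
    unfold SpanCfg
    rcases hw with rfl | rfl | rfl <;> simp only [] <;> omega
  obtain ⟨harena', hun⟩ := hpt.low_keep hall hcl
  have hbits := bits_keep hmid.bits hall hcfg
  have hinv : abiInv s_1159f3 := by v_inv
  have hpt' : Pt u₀ g pc_ERR A7 A s_1159f3 := by
    refine hpt.move hall (fun w hw => (hcl w hw).ok _ _) w_rip ?_ ?_ w_eq hinv (hfr.shadow.untouched hun) hfr.offText
      (Arena.Extends.refl _) (fun o ho => ho) harena' hmid.noTemps hbits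
    · rw [w_rsp, ← c_rsp]
      exact hfr.rsp
    · rw [w_kept.get .rbp rfl]
      exact c_rbp
  have hmap : stb_vorbis.mapping s_1159f3.mem g.f = 0 := by
    simp only [vacc, voff]
    rw [← hm1, r2_fld]
    rfl
  refine ⟨A, hpt'.frame, hpt'.hand, Or.inl ⟨?_, ?_⟩⟩
  · rw [w_rax]
    rfl
  · exact hpt'.mid.failed (by omega) (hpt'.mid.h2_done (by omega)) (hpt'.mid.h3_done (by omega)) (H5.of_null hmap)

/-- **0x1159c7 … 0x115f22, `mapping ≠ NULL`** (stb_vorbis_fixed.c:4092 – 4095): the store of `f->mapping` (check store8 `f + 0x1d8`),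
the load of `f->mapping_count` (check load4 `f + 0x1d0`), `memset(mapping, 0, 56·mapping_count)` (the new block is a live object),
`r15d = 0`, `i = 0` into `[rsp+0x10]`: the head of loop 4095 (`r8_exit`). -/
theorem r2_ok (Lay : Layout) (hLay : Lay.hi = 0x1000000) (μ : Microarch) (hμ : UserX.MicroOK μ) (u₀ : State)
    (hcode : HasCodeNat Lay u₀ Vorbis.L.start_decoder.entry Vorbis.Code.code_start_decoder.nat Vorbis.L.start_decoder.size)
    (hload4 : Asan.SmallCheck Lay μ Vorbis.WayInv (Vorbis.CodeOK u₀) [.rax, .rcx, .rdx] 4 Vorbis.L.__asan_load4_noabort.entry)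
    (hstore8 : Asan.SmallCheck Lay μ Vorbis.WayInv (Vorbis.CodeOK u₀) [.rax, .rcx, .rdx] 8 Vorbis.L.__asan_store8_noabort.entry)
    (h_memset : ∀ (others : List Obj) (frames : List (Nat × FrameLayout)), Calls Lay μ Vorbis.WayInv (Vorbis.conv u₀) Vorbis.L.memset.entry (Vorbis.Spec.memset.spec others frames))
    (g : Ghost) (A7 : Arena) (A : Arena × List Obj) (v : State) (hpt : Pt u₀ g Vorbis.L.start_decoder.cut237 A7 A v)
    (hmp1 : 1 ≤ stb_vorbis.mapping_count v.mem g.f ∧ stb_vorbis.mapping_count v.mem g.f ≤ 64)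
    (hp0 : (v.reg .rax).toNat ≠ 0)
    (hblk : Since A7 A.1 ⟨(v.reg .rax).toNat, Off.sizeof.Mapping * (stb_vorbis.mapping_count v.mem g.f).toNat⟩) :
    ReachVia Lay μ WayInv v (fun w => AtR8 u₀ g 0 w) := by
  have hfr := hpt.frame
  have hmid := hpt.mid
  have he := hfr.entry
  v_entry he
  simp only [depth] at he_room he_stack
  have hR := hfr.r_eq
  simp only [steady] at hR
  have eRA : g.RA = (g.e.reg .rsp).toNat := rfl
  have hwh := obj_where hfr hpt.hand
  have w_rip := hfr.rip
  have c_rsp : v.reg .rsp = g.e.reg .rsp - 1480 := by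
    rw [hfr.rsp]
    exact rsp_eq _ (by omega)
  have c_rbp := hpt.rbp
  have w_eq : Mem.EqOn Vorbis.L.textLo Vorbis.L.textHi u₀.mem v.mem := hfr.code
  have hdf : v.flags .df = false := (show abiInv _ from hfr.inv).1
  have hmx : v.mxcsr &&& 0x1F80 = 0x1F80 := (show abiInv _ from hfr.inv).2
  have hsse := Vorbis.sseOK_of_abiInv hfr.inv
  have hms := h_memset A.2 g.frames'
  have hfa : (addr g.f).toNat = g.f := toNat_addr _ (by omega)
  -- the block just allocated, and the count
  obtain ⟨p, hp⟩ : ∃ p : Nat, (v.reg .rax).toNat = p := ⟨_, rfl⟩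
  have c_rax : v.reg .rax = addr p := eq_addr _ _ hp
  obtain ⟨m, hm⟩ : ∃ m : Nat, (stb_vorbis.mapping_count v.mem g.f).toNat = m := ⟨_, rfl⟩
  rw [hp, hm] at hblk
  simp only [voff] at hblk
  have harena := hmid.arena
  have hin := arena_inside harena hblk.1
  have hoffs := harena.blk_off_stack hblk.1
  have hab := harena.bounds
  have htext := hpt.hand.arenaText
  have eT : L.textHi = 0x119d40 := rfl
  simp only [] at hin hoffs
  have hout := hpt.hand.objOut
  simp only [Off.sizeof.stb_vorbis] at hout
  have hm64 : 1 ≤ m ∧ m ≤ 64 := by omega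
  have hpa : (addr p).toNat = p := toNat_addr _ (by omega)
  have r464 : v.mem.readLE (addr g.f + 464) 4 = m := by
    rw [r2_fld]
    show v.mem.u32 (g.f + 464) = m
    have h0 : 0 ≤ v.mem.i32 (g.f + 464) := by
      have := hmp1.1
      simp only [vacc, voff] at this
      omega
    rw [v.mem.u32_of_i32_nonneg _ h0, ← hm]
    simp only [vacc, voff]
  u_walk hcode [hμ.vendor] until [Vorbis.L.start_decoder.cut269, Vorbis.L.start_decoder.cut270] span [Vorbis.L.textLo, Vorbis.L.textHi] side (v_side)
  case check_1159d1 =>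
    -- 0x1159d1: the check of the store `f->mapping = …` (stb_vorbis_fixed.c:4092)
    have hun : ShadowUntouched v.mem s_1159d1.mem := by v_untouched
    exact check_field hfr hmid hun 472 8 (by omega) (by omega) (r2_fld g.f 472)
  case check_115efa =>
    -- 0x115efa: the check of the load `f->mapping_count` (stb_vorbis_fixed.c:4094)
    have hun : ShadowUntouched v.mem s_115efa.mem := by v_untouched
    exact check_field hfr hmid hun 464 4 (by omega) (by omega) (r2_fld g.f 464)
  case call_inv =>
    v_inv
  case pre_115f12 =>
    -- the precondition of `memset(mapping, 0, 56·mapping_count)`: the block just allocated is a live object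
    have hs : Mem.SameExcept [⟨g.RA - 1888, g.R⟩, ⟨g.f + 472, g.f + 480⟩] v.mem s_115f12.mem := by
      u_same
    have hcl : ∀ w, w ∈ [(⟨g.RA - 1888, g.R⟩ : Span), ⟨g.f + 472, g.f + 480⟩] → SpanLow g w := by
      intro w hw
      simp only [List.mem_cons, List.mem_nil_iff, or_false] at hw
      unfold SpanLow
      rcases hw with rfl | rfl <;> simp only [] <;> omega
    obtain ⟨_, hun⟩ := hpt.low_keep hs hcl
    refine ⟨shadowPre_call hfr (by rw [w_rsp]; u_omega) hun, Or.inr ?_⟩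
    rw [w_rdi, w_rdx, rdx_val m hm64.2, hpa]
    exact liveIn_of_arenaBlk harena hblk.1
  -- 0x115f17: `memset` has returned
  have w_eq := Vorbis.conv_code_eqOn w_code
  have w_df := (show X86.User.abiInv _ from w_inv).1
  have w_mx := (show X86.User.abiInv _ from w_inv).2
  have w_sse := Vorbis.sseOK_of_abiInv w_inv
  simp only [X86.User.Spec.footprint, vspec, w_rsp_115f12, w_rdi_115f12, hpa, w_rdx_115f12, rdx_val m hm64.2] at w_same
  -- the slots and fields the rest of the segment needs, read through `memset`'s footprint
  have hz24 : v.mem.readLE (g.e.reg .rsp - 1444) 4 = 0 := by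
    have h := r2_slot32 g v.mem 36 (by omega) (by omega)
    rw [hmid.consts.z24 (by omega) (by omega)] at h
    exact h
  have hz0 : s_115f12.mem.readLE (g.e.reg .rsp - 1444) 4 = 0 := by
    rw [w_mem_115f12]
    u_read
  have hzr : s_115f12r.mem.readLE (g.e.reg .rsp - 1444) 4 = 0 := by
    u_frame hz0
  have hm0 : s_115f12.mem.readLE (addr g.f + 472) 8 = (addr p).toNat := by
    rw [w_mem_115f12]
    u_read
  rw [hpa] at hm0
  have hm1 : s_115f12r.mem.readLE (addr g.f + 472) 8 = p := by
    u_frame hm0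
  have hc0 : s_115f12.mem.readLE (addr g.f + 464) 4 = m := by
    rw [w_mem_115f12]
    u_read
  have hc1 : s_115f12r.mem.readLE (addr g.f + 464) 4 = m := by
    u_frame hc0
  rw [w_mem_115f12] at w_same
  have hall : Mem.SameExcept [⟨g.RA - 1888, g.R⟩, ⟨g.f + 472, g.f + 480⟩, ⟨p, p + 56 * m⟩] v.mem s_115f12r.mem := by
    u_same
  have hcl : ∀ w, w ∈ [(⟨g.RA - 1888, g.R⟩ : Span), ⟨g.f + 472, g.f + 480⟩, ⟨p, p + 56 * m⟩] → SpanOK g A7 A.1 w := by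
    intro w hw
    simp only [List.mem_cons, List.mem_nil_iff, or_false] at hw
    unfold SpanOK
    rcases hw with rfl | rfl | rfl
    · left
      simp only []
      omega
    · right; right; right; left
      simp only []
      omega
    · right; right; right; right; right; right; right
      exact ⟨⟨p, 56 * m⟩, hblk, Nat.le_refl _, Nat.le_refl _⟩
  have hcfg : ∀ w, w ∈ [(⟨g.RA - 1888, g.R⟩ : Span), ⟨g.f + 472, g.f + 480⟩, ⟨p, p + 56 * m⟩] → SpanCfg g.f w := by
    intro w hw
    simp only [List.mem_cons, List.mem_nil_iff, or_false] at hw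
    unfold SpanCfg
    rcases hw with rfl | rfl | rfl <;> simp only [] <;> omega
  have hun : ShadowUntouched v.mem s_115f12r.mem := by
    apply hall.eqOn
    intro w hw
    simp only [List.mem_cons, List.mem_nil_iff, or_false] at hw
    rcases hw with rfl | rfl | rfl <;> simp only [] <;> omega
  have harena' : ArenaOK A.1 A.2 s_115f12r.mem g.f := by
    apply harena.frame (by simp only [Off.sizeof.stb_vorbis]; omega)
    apply hall.eqOn
    intro w hw
    simp only [List.mem_cons, List.mem_nil_iff, or_false] at hw
    rcases hw with rfl | rfl | rfl <;> simp only [voff] <;> omega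
  have hbits := bits_keep hmid.bits hall hcfg
  have hrsp : s_115f12r.reg .rsp = addr g.R := by
    rw [w_rsp, ← c_rsp]
    exact hfr.rsp
  have hrbp : s_115f12r.reg .rbp = addr g.f := by
    rw [w_kept.get .rbp rfl]
    exact c_rbp
  have hpt' : Pt u₀ g Vorbis.L.start_decoder.cut269 A7 A s_115f12r :=
    hpt.move hall hcl w_rip hrsp hrbp w_eq w_inv (hfr.shadow.untouched hun) hfr.offText
      (Arena.Extends.refl _) (fun o ho => ho) harena' hmid.noTemps hbits
  have hmc' := mc_of_read _ _ _ hm64.2 hc1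
  have hmap' := map_of_read _ _ _ hm1
  have hmp1' : 1 ≤ stb_vorbis.mapping_count s_115f12r.mem g.f ∧ stb_vorbis.mapping_count s_115f12r.mem g.f ≤ 64 := by
    rw [hmc']
    omega
  have hblk' : Since A7 A.1 ⟨stb_vorbis.mapping s_115f12r.mem g.f,
      Off.sizeof.Mapping * (stb_vorbis.mapping_count s_115f12r.mem g.f).toNat⟩ := by
    rw [hmc', hmap']
    simp only [voff, Int.toNat_natCast]
    exact hblk
  clear hall hcl hcfg hun harena' hbits hm0 hm1 hc0 hc1 hz0 hz24 w_same hmc' hmap' hin hoffs hab hout hblk harena hrsp hrbp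
  u_walk hcode [hμ.vendor] until [Vorbis.L.start_decoder.cut270] span [Vorbis.L.textLo, Vorbis.L.textHi] side (v_side)
  -- 0x115f22: the head of loop 4095 with `i = 0`
  refine ReachVia.done ?_
  have hinv : abiInv s_115f1e := by v_inv
  have eslot : g.e.reg .rsp - 1464 = addr (g.R + 0x10) := (slot_addr (g.e.reg .rsp) 16 (by omega) (by omega)).symm
  have hR16 : (addr (g.R + 0x10)).toNat = g.R + 0x10 := toNat_addr _ (by omega)
  refine r8_exit hpt' ?_ ?_ w_rip ?_ ?_ w_eq hinv hmp1' hblk'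
  · rw [w_mem, eslot]
    apply Mem.SameExcept.writeLE
    · rw [hR16]
      omega
    · refine ⟨_, List.mem_cons_self, ?_, ?_⟩
      · rw [hR16]
        exact Nat.le_refl _
      · rw [hR16]
        exact Nat.le_refl _
  · show s_115f1e.mem.readLE (addr (g.R + 0x10)) 4 = 0
    rw [w_mem, eslot, Mem.readLE_writeLE_same _ _ _ _ (by decide)]
  · rw [w_rsp, ← c_rsp]
    exact hfr.rsp
  · rw [w_kept.get .rbp rfl]
    exact c_rbp

end Vorbis.Spec.start_decoder_R2

/-- Segment `start_decoder.R2` takes its entry assertion `AtR2` to `AtR3`, `AtR8 … 0` or `AtERR`: the four walked pieces chained. -/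
theorem Vorbis.Spec.Worked.start_decoder_R2_ok : Vorbis.Spec.start_decoder_R2.Statement := by
  unfold Vorbis.Spec.start_decoder_R2.Statement
  intro Lay hLay μ hμ u₀ hcode hload4 h_get_bits hstore4 h_setup_malloc hstore8 h_error h_memset
  intro g i v hat
  obtain ⟨A6, A6c, A, hbody⟩ := hat
  -- 0x115982 … 0x1159a4: the loop test, and (SD.7) `get_bits(f, 6)`
  refine (Vorbis.Spec.start_decoder_R2.r2_head Lay hLay μ hμ u₀ hcode hload4 h_get_bits g i A6 A6c A v hbody).trans ?_
  intro w hw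
  rcases hw with h3 | ⟨hpt, hrax⟩
  · exact ReachVia.done (Or.inl h3)
  -- 0x1159a4 … 0x1159c7: `mapping_count`, `setup_malloc`
  refine (Vorbis.Spec.start_decoder_R2.r2_alloc Lay hLay μ hμ u₀ hcode hstore4 h_setup_malloc g A.1 A w hpt hrax).trans ?_
  intro w' hw'
  obtain ⟨A', hpt', hmp1, hres⟩ := hw'
  rcases hres with hnull | ⟨hp0, hblk⟩
  · -- 0x1159c7 … 0x113b22: `mapping = NULL`: `error(f, VORBIS_outofmem)`
    refine (Vorbis.Spec.start_decoder_R2.r2_fail Lay hLay μ hμ u₀ hcode hstore8 h_error g A.1 A' w' hpt' hnull).mono ?_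
    intro w'' h
    exact Or.inr (Or.inr h)
  · -- 0x1159c7 … 0x115f22: the store of `mapping`, `memset`, `i = 0`
    refine (Vorbis.Spec.start_decoder_R2.r2_ok Lay hLay μ hμ u₀ hcode hload4 hstore8 h_memset g A.1 A' w' hpt' hmp1 hp0 hblk).mono ?_
    intro w'' h
    exact Or.inr (Or.inl h)

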